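-- pv_equiv track=rewrite | github.com/SamR5/Solveur-de-Scrabble | data_extract.py | data_first_two
-- ===== SOURCE A (Python) =====
-- import string
--
-- def data_first_two(data):
--     """{"aa":wordsStartingWithAa, "ab":wordsStartingWithAb, "ac":...}"""
--     dic = {"".join([i, j]):{k for k in data if k.startswith(i+j)}
--            for i in string.ascii_lowercase
--            for j in string.ascii_lowercase}
--     toDel = []
--     for k, v in dic.items():
--         if len(v) == 0:
--             toDel.append(k)
--     for i in toDel:
--         del dic[i]
--     return dic
-- ===== SOURCE B (Python) =====
-- import string
--
-- _LOWERS = set(string.ascii_lowercase)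
--
--
-- def _wanted(w):
--     return len(w) >= 2 and w[0] in _LOWERS and w[1] in _LOWERS
--
--
-- def _key(w):
--     return w[:2]
--
--
-- def data_first_two(data):
--     """{"aa":wordsStartingWithAa, "ab":wordsStartingWithAb, "ac":...}"""
--     buckets = {}
--     for w in data:
--         if _wanted(w):
--             buckets.setdefault(_key(w), set()).add(w)
--     return {k: buckets[k] for k in sorted(buckets)}
-- ===== Notes on version B (the rewrite author's own statement) =====
-- stated objective: faster
-- what changed: Instead of scanning the whole word list once for each of the 676 alphabet pairs and then deleting empty buckets, B makes a single pass over the data inserting each qualifying word into a bucket keyed by its first two characters, then emits the occupied buckets in sorted key order.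
import Mathlib
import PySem

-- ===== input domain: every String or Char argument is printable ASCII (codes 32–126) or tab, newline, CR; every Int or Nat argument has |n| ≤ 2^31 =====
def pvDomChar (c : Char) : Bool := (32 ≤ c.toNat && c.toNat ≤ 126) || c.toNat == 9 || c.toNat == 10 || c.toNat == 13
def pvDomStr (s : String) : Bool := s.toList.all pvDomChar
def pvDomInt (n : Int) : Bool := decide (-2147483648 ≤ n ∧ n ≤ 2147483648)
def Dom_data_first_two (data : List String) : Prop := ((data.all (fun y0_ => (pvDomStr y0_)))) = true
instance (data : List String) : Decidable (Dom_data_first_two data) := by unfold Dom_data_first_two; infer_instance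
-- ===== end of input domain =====

-- B replaces A's 676 full scans of the data (one scan per alphabet pair, plus an
-- empty-bucket deletion pass) by a single bucketing pass over the data followed by a
-- sort of the occupied keys; return value only (neither version mutates its argument).

-- string.ascii_lowercase
def pvAsciiLowercase : List Char :=
  ['a','b','c','d','e','f','g','h','i','j','k','l','m','n','o','p','q','r','s','t','u','v','w','x','y','z']

-- ===== PORT A =====
def data_first_two (data : List String) : List (String × List String) :=
  -- dic = {"".join([i,j]): {k for k in data if k.startswith(i+j)} for i in … for j in …}
  let dic : PySem.Dict String (PySem.Set String) :=
    pvAsciiLowercase.foldl (fun d i =>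
      pvAsciiLowercase.foldl (fun d j =>
        d.insert (String.ofList [i, j])
          (PySem.Set.ofList (data.filter (fun k =>
            PySem.Str.startswith k (String.ofList [i, j]))))) d)
      PySem.Dict.empty
  -- toDel = []; for k, v in dic.items(): if len(v) == 0: toDel.append(k)
  let toDel : List String :=
    dic.items.foldl (fun acc p => if PySem.Set.len p.2 == 0 then acc ++ [p.1] else acc) []
  -- for i in toDel: del dic[i]
  let dic2 : PySem.Dict String (PySem.Set String) := toDel.foldl (fun d k => d.erase k) dic
  dic2.items

-- ===== PORT B =====
-- Source B's _LOWERS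
def pvLowers : PySem.Set Char := PySem.Set.ofList pvAsciiLowercase

-- Source B's _wanted(w): len(w) >= 2 and w[0] in _LOWERS and w[1] in _LOWERS
-- (exact: Python's `and` short-circuits, so w[0]/w[1] are only read when len(w) >= 2;
-- the match reads the first two characters exactly in that case)
def pvWanted (w : String) : Bool :=
  match w.toList with
  | c0 :: c1 :: _ => PySem.Set.contains pvLowers c0 && PySem.Set.contains pvLowers c1
  | _ => false

-- Source B's _key(w): w[:2]
def pvKeyB (w : String) : String := String.ofList (PySem.List.slice w.toList none (some 2))

def data_first_two_alt (data : List String) : List (String × List String) :=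
  -- buckets = {}; for w in data: if _wanted(w): buckets.setdefault(_key(w), set()).add(w)
  let buckets : PySem.Dict String (PySem.Set String) :=
    data.foldl (fun d w =>
      if pvWanted w then
        d.modify (pvKeyB w) PySem.Set.empty (fun s => PySem.Set.add s w)
      else d) PySem.Dict.empty
  -- {k: buckets[k] for k in sorted(buckets)}  (k ranges over buckets' own keys, so the
  -- lookup buckets[k] always succeeds; ported as getD)
  (PySem.List.sorted buckets.keys (fun k => k)).map
    (fun k => (k, buckets.getD k PySem.Set.empty))

-- ===== PRECONDITION & SPEC =====
def Spec_data_first_two (data : List String) (out : List (String × List String)) : Prop := out = data_first_two_alt data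
instance (data : List String) (out : List (String × List String)) : Decidable (Spec_data_first_two data out) := by unfold Spec_data_first_two; infer_instance

-- ===== CLAIM (what is proved, stated in full; the proofs are below) =====
def Claim_equal_data_first_two : Prop := ∀ (data : List String), Dom_data_first_two data → Spec_data_first_two data (data_first_two data)

-- ===== LEMMAS AND PROOFS =====

-- the 676 candidate prefixes, in A's insertion (= lexicographic) order
def pvPrefixes : List String :=
  pvAsciiLowercase.flatMap (fun i => pvAsciiLowercase.map (fun j => String.ofList [i, j]))

-- A's per-prefix set {k for k in data if k.startswith(p)}
def pvS (data : List String) (p : String) : PySem.Set String :=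
  PySem.Set.ofList (data.filter (fun k => PySem.Str.startswith k p))

-- A's dict comprehension, as a named term for the proofs
def pvDic (data : List String) : PySem.Dict String (PySem.Set String) :=
  pvAsciiLowercase.foldl (fun d i =>
    pvAsciiLowercase.foldl (fun d j =>
      d.insert (String.ofList [i, j])
        (PySem.Set.ofList (data.filter (fun k =>
          PySem.Str.startswith k (String.ofList [i, j]))))) d)
    PySem.Dict.empty

-- the canonical common form both ports are reduced to
def pvCanon (data : List String) : List (String × List String) :=
  (pvPrefixes.filter (fun q => !(PySem.Set.len (pvS data q) == 0))).map
    (fun q => (q, pvS data q))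

lemma pvLC_pairwise : pvAsciiLowercase.Pairwise (· < ·) := by decide

lemma pvPrefixes_mem (q : String) :
    q ∈ pvPrefixes ↔ ∃ c0 c1, c0 ∈ pvAsciiLowercase ∧ c1 ∈ pvAsciiLowercase ∧
      q = String.ofList [c0, c1] := by
  simp only [pvPrefixes, List.mem_flatMap, List.mem_map]
  constructor
  · rintro ⟨i, hi, j, hj, rfl⟩; exact ⟨i, j, hi, hj, rfl⟩
  · rintro ⟨i, j, hi, hj, rfl⟩; exact ⟨i, hi, j, hj, rfl⟩

lemma pvPrefixes_pairwise : pvPrefixes.Pairwise (· < ·) := by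
  rw [pvPrefixes, List.pairwise_flatMap]
  constructor
  · intro a _
    refine List.Pairwise.map _ ?_ pvLC_pairwise
    intro j j' h
    rw [String.lt_iff_toList_lt]; simp only [String.toList_ofList]
    show List.lt _ _
    rw [List.lt_iff_lex_lt]
    exact List.Lex.cons (List.Lex.rel h)
  · refine pvLC_pairwise.imp ?_
    intro i i' h x hx y hy
    simp only [List.mem_map] at hx hy
    obtain ⟨j, _, rfl⟩ := hx; obtain ⟨j', _, rfl⟩ := hy
    rw [String.lt_iff_toList_lt]; simp only [String.toList_ofList]
    show List.lt _ _
    rw [List.lt_iff_lex_lt]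
    exact List.Lex.rel h

lemma pvPrefixes_nodup : pvPrefixes.Nodup := pvPrefixes_pairwise.imp ne_of_lt

-- what B's filter accepts, spelled out
lemma pvWanted_spec (w : String) (h : pvWanted w = true) :
    ∃ c0 c1 t, w.toList = c0 :: c1 :: t ∧ c0 ∈ pvAsciiLowercase ∧ c1 ∈ pvAsciiLowercase ∧
      pvKeyB w = String.ofList [c0, c1] := by
  rcases hl : w.toList with _ | ⟨a, _ | ⟨b, t⟩⟩ <;>
    simp only [pvWanted, hl, Bool.and_eq_true, pvLowers] at h
  · exact absurd h (by simp)
  · exact absurd h (by simp)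
  · refine ⟨a, b, t, rfl, ?_, ?_, ?_⟩
    · exact (PySem.Set.mem_ofList _ _).mp ((PySem.Set.contains_iff _ _).mp h.1)
    · exact (PySem.Set.mem_ofList _ _).mp ((PySem.Set.contains_iff _ _).mp h.2)
    · rw [pvKeyB, hl, PySem.List.slice_to _ (by norm_num)]
      rfl

-- the bridge: startswith over a two-lowercase-letter prefix IS B's filter + key test
lemma pvBridge (w : String) (c0 c1 : Char) (h0 : c0 ∈ pvAsciiLowercase) (h1 : c1 ∈ pvAsciiLowercase) :
    PySem.Str.startswith w (String.ofList [c0, c1]) = (pvWanted w && (pvKeyB w == String.ofList [c0, c1])) := by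
  rw [Bool.eq_iff_iff]
  rcases hl : w.toList with _ | ⟨a, _ | ⟨b, t⟩⟩
  · simp [pvWanted, pvKeyB, hl, PySem.Str.startswith_eq, PySem.Chars.startswith]
  · simp [pvWanted, pvKeyB, hl, PySem.Str.startswith_eq, PySem.Chars.startswith]
  · have hsl : PySem.List.slice (a :: b :: t) none (some 2) = [a, b] := by
      rw [PySem.List.slice_to _ (by norm_num)]; rfl
    simp only [pvWanted, pvKeyB, pvLowers, hl, hsl, PySem.Str.startswith_eq,
      PySem.Chars.startswith, String.toList_ofList, List.isPrefixOf, Bool.and_eq_true,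
      beq_iff_eq, Bool.and_true]
    constructor
    · rintro ⟨rfl, rfl, -⟩
      refine ⟨⟨?_, ?_⟩, rfl⟩
      · exact (PySem.Set.contains_iff _ _).mpr ((PySem.Set.mem_ofList _ _).mpr h0)
      · exact (PySem.Set.contains_iff _ _).mpr ((PySem.Set.mem_ofList _ _).mpr h1)
    · rintro ⟨-, he⟩
      have h2 := congrArg String.toList he
      simp only [String.toList_ofList] at h2
      injection h2 with ha h2
      injection h2 with hb _
      subst ha; subst hb; exact ⟨rfl, rfl⟩

-- ---------- A-side ----------

lemma pv_foldl_erase (ks : List String) (d : PySem.Dict String (PySem.Set String)) :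
    (ks.foldl (fun d k => d.erase k) d).items
      = d.items.filter (fun p => !ks.contains p.1) := by
  induction ks generalizing d with
  | nil => simp
  | cons k ks ih =>
    rw [List.foldl_cons, ih]
    show (d.items.filter fun p => !(p.1 == k)).filter _ = _
    rw [List.filter_filter]
    exact List.filter_congr (fun p _ => by
      simp only [List.contains_cons, Bool.and_comm, List.contains_eq_mem]
      cases Decidable.em (p.1 = k) with
      | inl h => simp [h]
      | inr h => simp [h])

lemma pv_dic_items (data : List String) :
    (pvDic data).items = pvPrefixes.map (fun p => (p, pvS data p)) := by
  rw [pvDic]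
  have h1 : pvAsciiLowercase.foldl (fun d i =>
      pvAsciiLowercase.foldl (fun d j =>
        d.insert (String.ofList [i, j])
          (PySem.Set.ofList (data.filter (fun k =>
            PySem.Str.startswith k (String.ofList [i, j]))))) d)
      PySem.Dict.empty
      = pvPrefixes.foldl (fun d p => d.insert p (pvS data p)) PySem.Dict.empty := by
    rw [pvPrefixes, List.foldl_flatMap]
    simp only [List.foldl_map, pvS]
  rw [h1, PySem.Dict.items_foldl_insert_fresh pvPrefixes (fun p => p) (fun p => pvS data p)
    PySem.Dict.empty (fun a _ => PySem.Dict.contains_empty a) (by simpa using pvPrefixes_nodup)]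
  rfl

-- the toDel pass followed by the erase pass keeps exactly the non-empty buckets
lemma pvDel (d : PySem.Dict String (PySem.Set String))
    (hnd : (d.items.map Prod.fst).Nodup) :
    ((d.items.foldl (fun acc p => if PySem.Set.len p.2 == 0 then acc ++ [p.1] else acc) []).foldl
        (fun d k => d.erase k) d).items
      = d.items.filter (fun p => !(PySem.Set.len p.2 == 0)) := by
  rw [PySem.List.foldl_append_if, List.nil_append, pv_foldl_erase]
  refine List.filter_congr (fun p hp => ?_)
  have hm : ((d.items.filter (fun p => PySem.Set.len p.2 == 0)).map Prod.fst).contains p.1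
      = (PySem.Set.len p.2 == 0) := by
    rw [Bool.eq_iff_iff, List.contains_iff_mem]
    simp only [List.mem_map, List.mem_filter]
    constructor
    · rintro ⟨p', ⟨hp', hc⟩, he⟩
      have : p' = p := List.inj_on_of_nodup_map hnd hp' hp he
      rwa [this] at hc
    · intro h; exact ⟨p, ⟨hp, h⟩, rfl⟩
  exact congrArg (fun b => !b) hm

lemma pvA_eq (data : List String) : data_first_two data = pvCanon data := by
  have hA : data_first_two data
      = (((pvDic data).items.foldl
            (fun acc p => if PySem.Set.len p.2 == 0 then acc ++ [p.1] else acc) []).foldl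
          (fun d k => d.erase k) (pvDic data)).items := rfl
  rw [hA]
  have hd : (pvDic data).items = pvPrefixes.map (fun p => (p, pvS data p)) := pv_dic_items data
  have hcomp : (Prod.fst ∘ fun p : String => (p, pvS data p)) = fun p => p :=
    funext (fun _ => rfl)
  rw [pvDel _ (by rw [hd, List.map_map, hcomp, List.map_id']; exact pvPrefixes_nodup),
    hd, List.filter_map, pvCanon]
  exact congrArg (List.map _) (List.filter_congr fun q _ => rfl)
-- ---------- B-side ----------

-- B's bucket dict, as a named term for the proofs
def pvBuckets (data : List String) : PySem.Dict String (PySem.Set String) :=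
  data.foldl (fun d w =>
    if pvWanted w then
      d.modify (pvKeyB w) PySem.Set.empty (fun s => PySem.Set.add s w)
    else d) PySem.Dict.empty

lemma pvBuckets_eq (data : List String) :
    pvBuckets data
      = (data.filter pvWanted).foldl
          (fun d w => d.modify (pvKeyB w) PySem.Set.empty (fun s => PySem.Set.add s w))
          PySem.Dict.empty := by
  rw [pvBuckets, List.foldl_filter]

lemma pvGetD (l : List String) (d : PySem.Dict String (PySem.Set String)) (q : String) :
    (l.foldl (fun d w => d.modify (pvKeyB w) PySem.Set.empty (fun s => PySem.Set.add s w)) d).getD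
        q PySem.Set.empty
      = (l.filter (fun w => pvKeyB w == q)).foldl PySem.Set.add (d.getD q PySem.Set.empty) := by
  induction l generalizing d with
  | nil => rfl
  | cons w l ih =>
    rw [List.foldl_cons, ih, List.filter_cons]
    by_cases hw : pvKeyB w = q
    · simp only [hw, beq_self_eq_true, if_pos, List.foldl_cons]
      rw [← hw, PySem.Dict.getD_modify_self]
    · have hbeq : (pvKeyB w == q) = false := beq_eq_false_iff_ne.mpr hw
      simp only [hbeq, Bool.false_eq_true, if_neg, not_false_iff]
      rw [PySem.Dict.getD_modify_of_ne _ _ _ (Ne.symm hw)]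

lemma pvKeys (data : List String) :
    (pvBuckets data).keys = PySem.Set.ofList ((data.filter pvWanted).map pvKeyB) := by
  rw [pvBuckets_eq, PySem.Dict.keys_foldl_modify_key, PySem.Dict.keys_empty,
    PySem.Set.update_nil_left]

-- membership in B's key set = membership in the occupied lexicon prefixes
lemma pvKeys_mem (data : List String) (q : String) :
    (q ∈ (pvBuckets data).keys)
      ↔ (q ∈ pvPrefixes ∧ ¬ (PySem.Set.len (pvS data q) == 0) = true) := by
  have hne : (¬ (PySem.Set.len (pvS data q) == 0) = true)
      ↔ ∃ w, w ∈ data ∧ PySem.Str.startswith w q = true := by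
    rw [pvS]
    simp only [PySem.Set.len, beq_iff_eq, Nat.cast_eq_zero, List.length_eq_zero_iff]
    rw [← ne_eq, ← List.isEmpty_eq_false_iff, List.isEmpty_eq_false_iff_exists_mem]
    constructor
    · rintro ⟨w, hw⟩
      have := (PySem.Set.mem_ofList _ _).mp hw
      exact ⟨w, (List.mem_filter.mp this).1, (List.mem_filter.mp this).2⟩
    · rintro ⟨w, hw, hsw⟩
      exact ⟨w, (PySem.Set.mem_ofList _ _).mpr (List.mem_filter.mpr ⟨hw, hsw⟩)⟩
  rw [pvKeys, hne]
  rw [PySem.Set.mem_ofList, List.mem_map]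
  constructor
  · rintro ⟨w, hw, rfl⟩
    obtain ⟨hwd, hwant⟩ := List.mem_filter.mp hw
    obtain ⟨c0, c1, t, hl, h0, h1, hk⟩ := pvWanted_spec w hwant
    refine ⟨(pvPrefixes_mem _).mpr ⟨c0, c1, h0, h1, hk⟩, w, hwd, ?_⟩
    rw [hk, pvBridge w c0 c1 h0 h1, hwant, ← hk, Bool.true_and, beq_self_eq_true]
  · rintro ⟨hqp, w, hwd, hsw⟩
    obtain ⟨c0, c1, h0, h1, rfl⟩ := (pvPrefixes_mem q).mp hqp
    rw [pvBridge w c0 c1 h0 h1, Bool.and_eq_true, beq_iff_eq] at hsw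
    exact ⟨w, List.mem_filter.mpr ⟨hwd, hsw.1⟩, hsw.2⟩

lemma pvSorted_keys (data : List String) :
    PySem.List.sorted (pvBuckets data).keys (fun k => k)
      = pvPrefixes.filter (fun q => !(PySem.Set.len (pvS data q) == 0)) := by
  refine PySem.List.sorted_eq_of_perm_of_pairwise_lt _ _ _ ?_ ?_
  · refine (List.perm_ext_iff_of_nodup (List.Nodup.filter _ pvPrefixes_nodup) ?_).mpr ?_
    · rw [pvKeys]; exact PySem.Set.nodup_ofList _
    · intro q
      rw [List.mem_filter, pvKeys_mem data q]
      simp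
  · exact List.Pairwise.filter _ pvPrefixes_pairwise

lemma pvGetD_canon (data : List String) (q : String) (hq : q ∈ pvPrefixes) :
    (pvBuckets data).getD q PySem.Set.empty = pvS data q := by
  rw [pvBuckets_eq, pvGetD, PySem.Dict.getD_empty]
  simp only [PySem.Set.empty]
  rw [← PySem.Set.ofList_eq_foldl, List.filter_filter, pvS]
  obtain ⟨c0, c1, h0, h1, rfl⟩ := (pvPrefixes_mem q).mp hq
  refine congrArg PySem.Set.ofList (List.filter_congr (fun w _ => ?_))
  rw [pvBridge w c0 c1 h0 h1, Bool.and_comm]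

lemma pvB_eq (data : List String) : data_first_two_alt data = pvCanon data := by
  have hB : data_first_two_alt data
      = (PySem.List.sorted (pvBuckets data).keys (fun k => k)).map
          (fun k => (k, (pvBuckets data).getD k PySem.Set.empty)) := rfl
  rw [hB, pvSorted_keys, pvCanon]
  refine List.map_congr_left (fun q hq => ?_)
  rw [pvGetD_canon data q (List.mem_of_mem_filter hq)]

-- ===== VERDICT (by name: the statement is the Claim_ definition above) =====
theorem data_first_two_spec : Claim_equal_data_first_two := by
  intro data _
  show data_first_two data = data_first_two_alt data
  rw [pvA_eq, pvB_eq]
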